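-- pv_equiv track=rewrite | github.com/madsondeluna/evo-hex | cath_analysis/helix_analysis.py | _extract_helix_segments
-- ===== SOURCE A (Python) =====
-- from collections import Counter, defaultdict
--
-- def _extract_helix_segments(
--     ss_sequence: list[str],
--     aa_sequence: list[str],
--     min_length: int = 4,
-- ) -> tuple[Counter, dict, list[int]]:
--     """Extrai resíduos helicais e posições de uma sequência de estrutura secundária.
--
--     Args:
--         ss_sequence: Lista de códigos DSSP por resíduo.
--         aa_sequence: Lista de aminoácidos (1-letra) correspondentes.
--         min_length: Comprimento mínimo para considerar uma hélice.
--
--     Returns: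
--         Tupla (helix_residues, helix_positions, helix_lengths).
--     """
--     helix_residues: Counter = Counter()
--     helix_positions: dict = defaultdict(Counter)
--     helix_lengths: list[int] = []
--
--     current: list[str] = []
--
--     def _flush(segment: list[str]) -> None:
--         if len(segment) < min_length:
--             return
--         helix_lengths.append(len(segment))
--         for j, res in enumerate(segment):
--             helix_residues[res] += 1
--             if j == 0:
--                 helix_positions["N-terminal"][res] += 1
--             elif j == len(segment) - 1:
--                 helix_positions["C-terminal"][res] += 1
--             else:
--                 helix_positions["Middle"][res] += 1
--
--     for ss, aa in zip(ss_sequence, aa_sequence):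
--         if ss in ("H", "G", "I"):
--             current.append(aa)
--         else:
--             _flush(current)
--             current = []
--     _flush(current)  # última hélice
--
--     return helix_residues, dict(helix_positions), helix_lengths
-- ===== SOURCE B (Python) =====
-- from collections import Counter
--
--
-- def _extract_helix_segments(
--     ss_sequence: list[str],
--     aa_sequence: list[str],
--     min_length: int = 4,
-- ) -> tuple[Counter, dict, list[int]]:
--     """Index-arithmetic version: compute the cut positions (non-helix codes),
--     turn consecutive cuts into (start, end) index spans, keep the qualifying
--     spans, derive a flat (position-label, residue) stream from the spans, and
--     build all three results from that stream."""
--     pairs = list(zip(ss_sequence, aa_sequence))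
--     n = len(pairs)
--     cuts = [-1] + [i for i, (ss, _) in enumerate(pairs) if ss not in ("H", "G", "I")] + [n]
--     spans = [(a + 1, b) for a, b in zip(cuts, cuts[1:]) if b - (a + 1) >= min_length]
--     helix_lengths = [b - a for a, b in spans]
--     labeled = [
--         ("N-terminal" if i == a else "C-terminal" if i == b - 1 else "Middle",
--          pairs[i][1])
--         for a, b in spans
--         for i in range(a, b)
--     ]
--     helix_residues = Counter(res for _, res in labeled)
--     helix_positions = {}
--     for lab, res in labeled:
--         helix_positions.setdefault(lab, Counter())[res] += 1
--     return helix_residues, helix_positions, helix_lengths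
-- ===== Notes on version B (the rewrite author's own statement) =====
-- stated objective: alternative
-- what changed: A streams over zip(ss,aa) flushing a running buffer via a state-mutating closure and tallies each segment with an inner enumerate loop; B never builds segment lists: it computes cut indices, pairs consecutive cuts into (start,end) index spans, filters the qualifying spans, derives one flat (label,residue) stream by index arithmetic, and builds the Counter and the positions dict from that single stream.
import Mathlib
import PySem

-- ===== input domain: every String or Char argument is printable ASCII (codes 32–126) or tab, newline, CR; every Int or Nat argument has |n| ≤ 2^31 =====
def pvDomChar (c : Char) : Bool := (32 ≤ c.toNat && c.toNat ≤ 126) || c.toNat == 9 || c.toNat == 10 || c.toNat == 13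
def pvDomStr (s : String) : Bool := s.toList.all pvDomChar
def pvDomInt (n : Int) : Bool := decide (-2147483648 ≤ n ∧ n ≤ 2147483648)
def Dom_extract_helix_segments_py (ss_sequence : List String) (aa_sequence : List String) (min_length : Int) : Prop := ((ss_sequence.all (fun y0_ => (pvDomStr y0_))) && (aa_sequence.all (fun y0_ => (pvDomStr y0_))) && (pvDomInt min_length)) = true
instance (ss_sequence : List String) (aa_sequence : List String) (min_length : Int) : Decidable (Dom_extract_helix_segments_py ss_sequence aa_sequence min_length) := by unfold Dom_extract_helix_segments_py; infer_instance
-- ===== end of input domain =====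

-- B replaces A's buffer-flushing stream with index arithmetic: cut positions → (start,end)
-- spans → one flat (label, residue) stream that feeds all three results (objective: alternative
-- structure, same cost). Proved equal on the whole domain.

-- ===== PORT A =====
-- state: (helix_residues, helix_positions, helix_lengths)
abbrev PvSt := PySem.Dict String Int × PySem.Dict String (PySem.Dict String Int) × List Int

-- `ss in ("H", "G", "I")` (shared by both ports)
def pvIsHelix (s : String) : Bool := s == "H" || s == "G" || s == "I"

-- A's nested `_flush` closure (mutates the three accumulators; here: state passing)
def pvFlushA (min_length : Int) (st : PvSt) (segment : List String) : PvSt :=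
  if (segment.length : Int) < min_length then st
  else
    let st1 : PvSt := (st.1, st.2.1, st.2.2 ++ [(segment.length : Int)])
    (PySem.List.enumerate segment 0).foldl (fun st je =>
      let res := je.2
      let hr := st.1.modify res 0 (· + 1)
      let hp :=
        if je.1 == 0 then
          st.2.1.modify "N-terminal" PySem.Dict.empty (fun c => c.modify res 0 (· + 1))
        else if je.1 == (segment.length : Int) - 1 then
          st.2.1.modify "C-terminal" PySem.Dict.empty (fun c => c.modify res 0 (· + 1))
        else
          st.2.1.modify "Middle" PySem.Dict.empty (fun c => c.modify res 0 (· + 1))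
      (hr, hp, st.2.2)) st1

def extract_helix_segments_py (ss_sequence : List String) (aa_sequence : List String) (min_length : Int) : (List (String × Int)) × (List (String × List (String × Int))) × List Int :=
  -- for ss, aa in zip(...): append to current, or flush current and reset
  let r := (ss_sequence.zip aa_sequence).foldl
    (fun (sc : PvSt × List String) p =>
      if pvIsHelix p.1 then (sc.1, sc.2 ++ [p.2])
      else (pvFlushA min_length sc.1 sc.2, []))
    ((PySem.Dict.empty, PySem.Dict.empty, []), [])
  let st := pvFlushA min_length r.1 r.2   -- _flush(current): última hélice
  (st.1.items, st.2.1.items.map (fun p => (p.1, p.2.items)), st.2.2)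

-- ===== PORT B =====
-- "N-terminal" if i == a else "C-terminal" if i == b - 1 else "Middle"
def pvLabel (a b i : Int) : String :=
  if i == a then "N-terminal" else if i == b - 1 then "C-terminal" else "Middle"

def extract_helix_segments_py_alt (ss_sequence : List String) (aa_sequence : List String) (min_length : Int) : (List (String × Int)) × (List (String × List (String × Int))) × List Int :=
  let pairs := ss_sequence.zip aa_sequence
  let n : Int := pairs.length
  let cuts : List Int := [-1] ++ ((PySem.List.enumerate pairs 0).filterMap (fun e => if pvIsHelix e.2.1 then none else some e.1)) ++ [n]
  let spans := (cuts.zip (cuts.drop 1)).filterMap (fun q => if min_length ≤ q.2 - (q.1 + 1) then some (q.1 + 1, q.2) else none)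
  let helix_lengths := spans.map (fun p => p.2 - p.1)
  let labeled := spans.flatMap (fun p => (PySem.List.pyRange p.1 p.2 1).map (fun i => (pvLabel p.1 p.2 i, ((PySem.List.pyGet? pairs i).map Prod.snd).getD "")))
  let helix_residues := PySem.Dict.counter (labeled.map (fun pr => pr.2))
  let helix_positions := labeled.foldl (fun d pr => (d.setdefault pr.1 PySem.Dict.empty).modify pr.1 PySem.Dict.empty (fun c => c.modify pr.2 0 (· + 1))) PySem.Dict.empty
  (helix_residues.items, helix_positions.items.map (fun q => (q.1, q.2.items)), helix_lengths)

-- ===== PRECONDITION & SPEC =====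
def Spec_extract_helix_segments_py (ss_sequence : List String) (aa_sequence : List String) (min_length : Int) (out : (List (String × Int)) × (List (String × List (String × Int))) × List Int) : Prop := out = extract_helix_segments_py_alt ss_sequence aa_sequence min_length
instance (ss_sequence : List String) (aa_sequence : List String) (min_length : Int) (out : (List (String × Int)) × (List (String × List (String × Int))) × List Int) : Decidable (Spec_extract_helix_segments_py ss_sequence aa_sequence min_length out) := by unfold Spec_extract_helix_segments_py; infer_instance

-- ===== CLAIM (what is proved, stated in full; the proofs are below) =====
def Claim_equal_extract_helix_segments_py : Prop := ∀ (ss_sequence : List String) (aa_sequence : List String) (min_length : Int), Dom_extract_helix_segments_py ss_sequence aa_sequence min_length → Spec_extract_helix_segments_py ss_sequence aa_sequence min_length (extract_helix_segments_py ss_sequence aa_sequence min_length)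

-- ===== LEMMAS AND PROOFS =====

-- the per-run decomposition of the zipped input: (first run of aa-letters, later pieces)
def pvSegSplit : List (String × String) → List String × List (List String)
  | [] => ([], [])
  | p :: rest =>
    let r := pvSegSplit rest
    if pvIsHelix p.1 then (p.2 :: r.1, r.2) else ([], r.1 :: r.2)

-- the flat (label, residue) stream of one segment
def pvLabelSeg (seg : List String) : List (String × String) :=
  (PySem.List.enumerate seg 0).map (fun je => (pvLabel 0 (seg.length : Int) je.1, je.2))

-- residues of P at indices [a, b)
def pvSlice (P : List (String × String)) (a b : Int) : List String :=
  (PySem.List.pyRange a b 1).map (fun i => ((PySem.List.pyGet? P i).map Prod.snd).getD "")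

-- B's labeled stream of the span [a, b)
def pvExtract (P : List (String × String)) (a b : Int) : List (String × String) :=
  (PySem.List.pyRange a b 1).map (fun i => (pvLabel a b i, ((PySem.List.pyGet? P i).map Prod.snd).getD ""))

def pvResStep (d : PySem.Dict String Int) (pr : String × String) : PySem.Dict String Int :=
  d.modify pr.2 0 (· + 1)

def pvPosStep (d : PySem.Dict String (PySem.Dict String Int)) (pr : String × String) : PySem.Dict String (PySem.Dict String Int) :=
  d.modify pr.1 PySem.Dict.empty (fun c => c.modify pr.2 0 (· + 1))

def pvQual (m : Int) (s : List String) : Bool := decide (m ≤ (s.length : Int))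

-- B's cut list for the suffix of the input starting at offset o
def pvCutsFrom (o : Int) (t : List (String × String)) : List Int :=
  ((PySem.List.enumerate t o).filterMap (fun e => if pvIsHelix e.2.1 then none else some e.1)) ++ [o + (t.length : Int)]

-- length and residue slice of the span a cut pair delimits
def pvF (P : List (String × String)) (q : Int × Int) : Int × List String :=
  (q.2 - (q.1 + 1), pvSlice P (q.1 + 1) q.2)

-- A's streaming loop + final flush = folding the flush over the segment decomposition
theorem pvLoop_eq_segments (m : Int) (l : List (String × String)) :
    ∀ (st : PvSt) (cur : List String),
    (let r := l.foldl
        (fun (sc : PvSt × List String) p =>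
          if pvIsHelix p.1 then (sc.1, sc.2 ++ [p.2])
          else (pvFlushA m sc.1 sc.2, [])) (st, cur)
     pvFlushA m r.1 r.2)
    = ((cur ++ (pvSegSplit l).1) :: (pvSegSplit l).2).foldl (pvFlushA m) st := by
  induction l with
  | nil => intro st cur; simp [pvSegSplit]
  | cons p rest ih =>
    intro st cur
    by_cases h : pvIsHelix p.1
    · simpa [pvSegSplit, h, List.foldl_cons] using ih st (cur ++ [p.2])
    · simpa [pvSegSplit, h, List.foldl_cons] using ih (pvFlushA m st cur) []

-- Source B's setdefault-then-increment is a single modify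
theorem pv_setdefault_modify {κ ν : Type} [BEq κ] [LawfulBEq κ]
    (d : PySem.Dict κ ν) (k : κ) (v : ν) (f : ν → ν) :
    (d.setdefault k v).modify k v f = d.modify k v f := by
  by_cases h : d.contains k = true
  · rw [PySem.Dict.setdefault_of_contains d v h]
  · have h' : d.contains k = false := by simpa using h
    rw [PySem.Dict.setdefault_of_not_contains d v h']
    show (d.insert k v).insert k (f ((d.insert k v).getD k v)) = d.insert k (f (d.getD k v))
    rw [PySem.Dict.getD_insert_self, PySem.Dict.insert_insert_self,
        PySem.Dict.getD_of_not_contains d v h']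

-- a fold on the triple state whose third component is untouched splits componentwise
theorem pv_triple_split {α : Type} (L : List α)
    (g1 : PySem.Dict String Int → α → PySem.Dict String Int)
    (g2 : PySem.Dict String (PySem.Dict String Int) → α → PySem.Dict String (PySem.Dict String Int))
    (a : PySem.Dict String Int) (b : PySem.Dict String (PySem.Dict String Int)) (c : List Int) :
    L.foldl (fun (st : PvSt) e => (g1 st.1 e, g2 st.2.1 e, st.2.2)) (a, b, c)
      = (L.foldl g1 a, L.foldl g2 b, c) := by
  induction L generalizing a b c with
  | nil => rfl
  | cons x t ih => simpa using ih (g1 a x) (g2 b x) c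

-- one qualifying flush = the two counter folds over the segment's labeled stream
theorem pv_flush_qual (m : Int) (seg : List String)
    (hr : PySem.Dict String Int) (hp : PySem.Dict String (PySem.Dict String Int)) (lens : List Int)
    (h : ¬ ((seg.length : Int) < m)) :
    pvFlushA m (hr, hp, lens) seg
      = ((pvLabelSeg seg).foldl pvResStep hr, (pvLabelSeg seg).foldl pvPosStep hp,
         lens ++ [(seg.length : Int)]) := by
  unfold pvFlushA
  rw [if_neg h]
  have hb : (fun (st : PvSt) (je : Int × String) =>
      let res := je.2
      let hr := st.1.modify res 0 (· + 1)
      let hp :=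
        if je.1 == 0 then
          st.2.1.modify "N-terminal" PySem.Dict.empty (fun c => c.modify res 0 (· + 1))
        else if je.1 == (seg.length : Int) - 1 then
          st.2.1.modify "C-terminal" PySem.Dict.empty (fun c => c.modify res 0 (· + 1))
        else
          st.2.1.modify "Middle" PySem.Dict.empty (fun c => c.modify res 0 (· + 1))
      ((hr, hp, st.2.2) : PvSt))
      = fun (st : PvSt) (je : Int × String) =>
        (pvResStep st.1 (pvLabel 0 (seg.length : Int) je.1, je.2),
         pvPosStep st.2.1 (pvLabel 0 (seg.length : Int) je.1, je.2), st.2.2) := by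
    funext st je
    by_cases h0 : je.1 == 0 <;> by_cases h1 : je.1 == (seg.length : Int) - 1 <;>
      simp [pvResStep, pvPosStep, pvLabel, h0, h1]
  rw [hb]
  dsimp only
  rw [pv_triple_split (PySem.List.enumerate seg 0)
    (fun d (je : Int × String) => pvResStep d (pvLabel 0 (seg.length : Int) je.1, je.2))
    (fun d (je : Int × String) => pvPosStep d (pvLabel 0 (seg.length : Int) je.1, je.2))
    hr hp (lens ++ [(seg.length : Int)])]
  simp [pvLabelSeg, List.foldl_map]

-- folding A's flush over all segments = filtering the qualifying ones, flattening their
-- labeled streams, and running the two counter folds on the flat stream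
theorem pv_fold_flush (m : Int) (segs : List (List String)) :
    ∀ (hr : PySem.Dict String Int) (hp : PySem.Dict String (PySem.Dict String Int)) (lens : List Int),
    segs.foldl (pvFlushA m) (hr, hp, lens)
      = (((segs.filter (pvQual m)).flatMap pvLabelSeg).foldl pvResStep hr,
         ((segs.filter (pvQual m)).flatMap pvLabelSeg).foldl pvPosStep hp,
         lens ++ (segs.filter (pvQual m)).map (fun s => (s.length : Int))) := by
  induction segs with
  | nil => intro hr hp lens; simp
  | cons s t ih =>
    intro hr hp lens
    rw [List.foldl_cons]
    by_cases hq : (s.length : Int) < m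
    · have hqf : pvQual m s = false := by simp [pvQual]; omega
      have hskip : pvFlushA m (hr, hp, lens) s = (hr, hp, lens) := by
        unfold pvFlushA; rw [if_pos hq]
      rw [hskip, List.filter_cons_of_neg (by simp [hqf]), ih]
    · have hqt : pvQual m s = true := by simp [pvQual]; omega
      rw [pv_flush_qual m s hr hp lens hq, ih, List.filter_cons_of_pos (by simp [hqt])]
      simp [List.foldl_append]

-- a span's labeled stream is the labeled stream of its residue slice
theorem pv_extract_eq (P : List (String × String)) (a b : Int) :
    pvExtract P a b = pvLabelSeg (pvSlice P a b) := by
  unfold pvExtract pvLabelSeg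
  rw [PySem.List.enumerate_eq_map_pyRange _ "", List.map_map]
  have hlen : (pvSlice P a b).length = (b - a).toNat := by
    simp [pvSlice, PySem.List.length_pyRange_one]
  apply List.ext_getElem
  · simp [PySem.List.length_pyRange_one, hlen]; omega
  · intro k hk1 hk2
    have hkN : k < (b - a).toNat := by
      simpa [PySem.List.length_pyRange_one] using hk1
    have hcast : (((b - a).toNat : Int)) = b - a := by omega
    simp only [List.getElem_map, PySem.List.getElem_pyRange_one, Function.comp_apply]
    have hk3 : k < (pvSlice P a b).length := by omega
    have hsl : PySem.List.pyGetD (pvSlice P a b) ((0 : Int) + (k : Int)) ""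
        = ((PySem.List.pyGet? P (a + (k : Int))).map Prod.snd).getD "" := by
      have h0k : ((0 : Int) + (k : Int)) = ((k : Nat) : Int) := by omega
      rw [h0k, PySem.List.pyGetD_natCast, List.getD_eq_getElem _ _ hk3]
      simp [pvSlice, PySem.List.getElem_pyRange_one]
    rw [hsl]
    refine Prod.ext ?_ rfl
    show pvLabel a b (a + (k : Int)) = pvLabel 0 ((pvSlice P a b).length : Int) (0 + (k : Int))
    unfold pvLabel
    simp only [beq_iff_eq, hlen]
    split_ifs <;> first | rfl | omega

-- B's cut pairs describe exactly the segment decomposition: lengths and residue slices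
theorem pv_spans_segs (P : List (String × String)) :
    ∀ (t : List (String × String)) (o : Int), 0 ≤ o → P.drop o.toNat = t →
    (((o - 1) :: pvCutsFrom o t).zip (pvCutsFrom o t)).map (pvF P)
    = ((pvSegSplit t).1 :: (pvSegSplit t).2).map (fun s => ((s.length : Int), s)) := by
  intro t
  induction t with
  | nil =>
    intro o ho hdrop
    have h1 : pvCutsFrom o [] = [o] := by
      unfold pvCutsFrom
      simp [PySem.List.enumerate_nil]
    rw [h1]
    have h2 : pvF P (o - 1, o) = (0, []) := by
      unfold pvF pvSlice
      rw [PySem.List.pyRange_one_eq_nil (by omega)]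
      simp
    simp [pvSegSplit, List.zip_cons_cons, h2]
  | cons p t ih =>
    intro o ho hdrop
    have hdropt : P.drop (o + 1).toNat = t := by
      have hot : (o + 1).toNat = o.toNat + 1 := by omega
      rw [hot, ← List.drop_drop, hdrop, List.drop_one, List.tail_cons]
    have hPo : PySem.List.pyGet? P o = some p := by
      rw [PySem.List.pyGet?_of_nonneg _ ho]
      have h0 := congrArg (fun l => l[0]?) hdrop
      simpa [List.getElem?_drop] using h0
    have hend : o + (((p :: t).length : Int)) = (o + 1) + (t.length : Int) := by
      push_cast [List.length_cons]; ring
    have hcc : pvCutsFrom o (p :: t)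
        = (if pvIsHelix p.1 then ([] : List Int) else [o]) ++ pvCutsFrom (o + 1) t := by
      unfold pvCutsFrom
      rw [PySem.List.enumerate_cons, List.filterMap_cons]
      by_cases hh : pvIsHelix p.1
      · simp [hh]
        omega
      · simp [hh]
        omega
    have ihh := ih (o + 1) (by omega) hdropt
    simp only [add_sub_cancel_right] at ihh
    obtain ⟨h1, cs'', hcs⟩ : ∃ h1 cs'', pvCutsFrom (o + 1) t = h1 :: cs'' := by
      cases hx : pvCutsFrom (o + 1) t with
      | nil =>
        exfalso
        have : pvCutsFrom (o + 1) t ≠ [] := by unfold pvCutsFrom; simp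
        exact this hx
      | cons a l => exact ⟨a, l, rfl⟩
    by_cases hh : pvIsHelix p.1
    · rw [hcc]
      simp only [hh, if_pos, List.nil_append]
      rw [hcs] at ihh ⊢
      rw [List.zip_cons_cons, List.map_cons] at ihh ⊢
      have hsegs : pvSegSplit (p :: t) = (p.2 :: (pvSegSplit t).1, (pvSegSplit t).2) := by
        simp [pvSegSplit, hh]
      rw [hsegs, List.map_cons]
      rw [List.map_cons] at ihh
      rw [List.cons.injEq] at ihh ⊢
      obtain ⟨hhead, htail⟩ := ihh
      refine ⟨?_, htail⟩
      unfold pvF at hhead ⊢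
      rw [Prod.mk.injEq] at hhead ⊢
      obtain ⟨hf1, hf2⟩ := hhead
      dsimp only at hf1 hf2
      have hlen1 : h1 - (o + 1) = ((pvSegSplit t).1.length : Int) := by omega
      have holt : o < h1 := by
        have := Int.natCast_nonneg (pvSegSplit t).1.length
        omega
      constructor
      · simp only [List.length_cons]
        push_cast
        omega
      · have ho1 : o - 1 + 1 = o := by ring
        rw [ho1]
        unfold pvSlice
        rw [PySem.List.pyRange_one_cons holt, List.map_cons, hPo]
        unfold pvSlice at hf2
        simp [hf2]
    · rw [hcc]
      simp only [hh, if_neg, Bool.false_eq_true, not_false_iff, List.singleton_append]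
      rw [hcs] at ihh ⊢
      have hsegs : pvSegSplit (p :: t) = ([], (pvSegSplit t).1 :: (pvSegSplit t).2) := by
        simp [pvSegSplit, hh]
      rw [hsegs]
      rw [List.zip_cons_cons, List.map_cons, List.map_cons]
      rw [List.zip_cons_cons, List.map_cons] at ihh
      rw [List.cons.injEq]
      constructor
      · unfold pvF pvSlice
        have ho1 : o - 1 + 1 = o := by ring
        rw [ho1, PySem.List.pyRange_one_eq_nil (by omega)]
        simp
      · exact ihh

-- list comprehension with a filter clause
theorem pv_filterMap_if {α β : Type} (L : List α) (c : α → Prop) [DecidablePred c] (tr : α → β) :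
    L.filterMap (fun q => if c q then some (tr q) else none)
      = (L.filter (fun q => decide (c q))).map tr := by
  induction L with
  | nil => rfl
  | cons x t ih =>
    by_cases h : c x <;> simp [h, ih]

-- filtering and projecting through a common image list
theorem pv_transport {α β γ δ : Type} (L : List α) (R : List β) (f : α → γ) (g : β → γ)
    (h : L.map f = R.map g) (c : γ → Bool) (u : γ → δ) :
    (L.filter (fun x => c (f x))).map (fun x => u (f x))
      = (R.filter (fun y => c (g y))).map (fun y => u (g y)) := by
  have hL : (L.filter (fun x => c (f x))).map (fun x => u (f x))
      = ((L.map f).filter c).map u := by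
    rw [List.filter_map, List.map_map]; rfl
  have hR : (R.filter (fun y => c (g y))).map (fun y => u (g y))
      = ((R.map g).filter c).map u := by
    rw [List.filter_map, List.map_map]; rfl
  rw [hL, hR, h]

-- B's filtered spans yield exactly the qualifying segments' lengths and labeled streams
theorem pv_b_spans (zz : List (String × String)) (m : Int) :
    ((((-1 : Int) :: pvCutsFrom 0 zz).zip (pvCutsFrom 0 zz)).filterMap
        (fun q => if m ≤ q.2 - (q.1 + 1) then some (q.1 + 1, q.2) else none)).map (fun p => p.2 - p.1)
      = (((pvSegSplit zz).1 :: (pvSegSplit zz).2).filter (pvQual m)).map (fun s => (s.length : Int))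
    ∧ ((((-1 : Int) :: pvCutsFrom 0 zz).zip (pvCutsFrom 0 zz)).filterMap
        (fun q => if m ≤ q.2 - (q.1 + 1) then some (q.1 + 1, q.2) else none)).flatMap (fun p => pvExtract zz p.1 p.2)
      = (((pvSegSplit zz).1 :: (pvSegSplit zz).2).filter (pvQual m)).flatMap pvLabelSeg := by
  have hM : ((((-1 : Int) :: pvCutsFrom 0 zz).zip (pvCutsFrom 0 zz)).map (pvF zz))
      = ((pvSegSplit zz).1 :: (pvSegSplit zz).2).map (fun s => ((s.length : Int), s)) := by
    have h := pv_spans_segs zz zz 0 le_rfl (by simp)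
    simpa using h
  have hfm := pv_filterMap_if (((-1 : Int) :: pvCutsFrom 0 zz).zip (pvCutsFrom 0 zz))
      (fun q : Int × Int => m ≤ q.2 - (q.1 + 1)) (fun q : Int × Int => (q.1 + 1, q.2))
  rw [hfm]
  constructor
  · have h2 := pv_transport _ _ (pvF zz) (fun s => (((s.length : Int), s) : Int × List String)) hM
        (fun g => decide (m ≤ g.1)) (fun g => g.1)
    simp only [pvF] at h2
    rw [List.map_map]
    simp only [Function.comp_def]
    unfold pvQual
    exact h2
  · have h3 := pv_transport _ _ (pvF zz) (fun s => (((s.length : Int), s) : Int × List String)) hM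
        (fun g => decide (m ≤ g.1)) (fun g => pvLabelSeg g.2)
    simp only [pvF] at h3
    rw [List.flatMap_def, List.flatMap_def, List.map_map]
    simp only [Function.comp_def]
    simp only [pv_extract_eq]
    unfold pvQual
    exact congrArg List.flatten h3

-- ===== VERDICT (by name: the statement is the Claim_ definition above) =====
theorem extract_helix_segments_py_spec : Claim_equal_extract_helix_segments_py := by
  intro ss aa m _
  show extract_helix_segments_py ss aa m = extract_helix_segments_py_alt ss aa m
  unfold extract_helix_segments_py extract_helix_segments_py_alt
  dsimp only
  have hA := pvLoop_eq_segments m (ss.zip aa) (PySem.Dict.empty, PySem.Dict.empty, []) []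
  simp only [List.nil_append] at hA
  rw [hA, pv_fold_flush]
  have hcuts : (([-1] ++ ((PySem.List.enumerate (ss.zip aa) 0).filterMap
        (fun e => if pvIsHelix e.2.1 then none else some e.1))) ++ [(((ss.zip aa).length : Int))])
      = (-1 : Int) :: pvCutsFrom 0 (ss.zip aa) := by
    unfold pvCutsFrom
    simp
  rw [hcuts]
  have hdrop1 : ((-1 : Int) :: pvCutsFrom 0 (ss.zip aa)).drop 1 = pvCutsFrom 0 (ss.zip aa) := rfl
  rw [hdrop1]
  have hext : (fun (p : Int × Int) => (PySem.List.pyRange p.1 p.2 1).map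
        (fun i => (pvLabel p.1 p.2 i, ((PySem.List.pyGet? (ss.zip aa) i).map Prod.snd).getD "")))
      = fun p => pvExtract (ss.zip aa) p.1 p.2 := rfl
  rw [hext]
  obtain ⟨hlenEq, hlabEq⟩ := pv_b_spans (ss.zip aa) m
  rw [hlenEq, hlabEq]
  have hcnt : PySem.Dict.counter
        (((((pvSegSplit (ss.zip aa)).1 :: (pvSegSplit (ss.zip aa)).2).filter (pvQual m)).flatMap pvLabelSeg).map (fun pr => pr.2))
      = ((((pvSegSplit (ss.zip aa)).1 :: (pvSegSplit (ss.zip aa)).2).filter (pvQual m)).flatMap pvLabelSeg).foldl pvResStep PySem.Dict.empty := by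
    rw [PySem.Dict.counter_eq_foldl, List.foldl_map]
    rfl
  rw [hcnt]
  have hpos : (fun (d : PySem.Dict String (PySem.Dict String Int)) (pr : String × String) =>
        (d.setdefault pr.1 PySem.Dict.empty).modify pr.1 PySem.Dict.empty (fun c => c.modify pr.2 0 (· + 1)))
      = pvPosStep := by
    funext d pr
    exact pv_setdefault_modify d pr.1 PySem.Dict.empty (fun c => c.modify pr.2 0 (· + 1))
  rw [hpos]
  simp only [List.nil_append]
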